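-- pv_equiv track=rewrite | github.com/LandonCalling/TIP101 | Unit 3/Section 2/Problem Set 1/sum_uniq_elements.py | sum_of_unique_elements
-- ===== SOURCE A (Python) =====
-- def sum_of_unique_elements(lst1, lst2):
--     freq_dict = {}
--
--     for num in lst1:
--         if num in freq_dict:
--             freq_dict[num] += 1
--         else:
--             freq_dict[num] = 1
--
--     uniq_values = [key for key in freq_dict if freq_dict[key] == 1]
--
--     for num in uniq_values.copy():
--         if num in lst2:
--             uniq_values.remove(num)
--
--     sum = 0
--
--     for num in uniq_values:
--         sum += num
--
--     return sum
-- ===== SOURCE B (Python) =====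
-- def sum_of_unique_elements(lst1, lst2):
--     s = sorted(lst1)
--     absent = set(lst2)
--     total = 0
--     i = 0
--     n = len(s)
--     while i < n:
--         j = i + 1
--         while j < n and s[j] == s[i]:
--             j += 1
--         if j - i == 1 and s[i] not in absent:
--             total += s[i]
--         i = j
--     return total
-- ===== Notes on version B (the rewrite author's own statement) =====
-- stated objective: faster
-- what changed: Replaced A's frequency-dict build, key filtering and copy/remove membership loop by sorting lst1 once and scanning runs of equal values, with set(lst2) for membership, summing each length-1 run's value not in lst2.
import Mathlib
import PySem

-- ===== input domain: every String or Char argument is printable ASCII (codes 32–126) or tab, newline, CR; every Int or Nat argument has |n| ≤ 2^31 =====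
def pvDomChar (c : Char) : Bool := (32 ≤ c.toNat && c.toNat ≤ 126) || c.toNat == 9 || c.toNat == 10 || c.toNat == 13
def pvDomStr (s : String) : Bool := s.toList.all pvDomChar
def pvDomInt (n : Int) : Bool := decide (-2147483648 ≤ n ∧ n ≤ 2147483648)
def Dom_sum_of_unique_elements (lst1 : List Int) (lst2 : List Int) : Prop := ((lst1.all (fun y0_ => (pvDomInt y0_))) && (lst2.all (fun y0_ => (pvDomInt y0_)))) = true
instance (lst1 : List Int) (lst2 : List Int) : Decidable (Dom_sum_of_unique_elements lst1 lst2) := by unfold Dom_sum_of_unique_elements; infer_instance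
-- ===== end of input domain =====

-- B replaces A's frequency dict + copy/remove loop by a sort-then-scan over runs of equal values; return values proved equal.

-- ===== PORT A =====
def sum_of_unique_elements (lst1 : List Int) (lst2 : List Int) : Int :=
  let freq : PySem.Dict Int Int :=
    lst1.foldl (fun d num =>
      if d.contains num then d.insert num (d.getD num 0 + 1) else d.insert num 1)
      PySem.Dict.empty
  let uniq_values := freq.keys.filter (fun k => freq.getD k 0 == 1)
  let uniq2 := uniq_values.foldl (fun acc num =>
      if lst2.contains num then
        match PySem.List.remove? acc num with
        | some l => l
        | none => acc
      else acc) uniq_values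
  uniq2.foldl (fun s num => s + num) 0

-- ===== PORT B =====
-- the two nested while loops of Source B: the outer loop walks the runs of the sorted
-- list (adding a run's value when its length is 1 and it is not in `absent`); the
-- inner `j` loop, which skips the rest of the current run, is the dropWhile
def sumRunsB (absent : List Int) : List Int → Int
  | [] => 0
  | x :: rest =>
    (if (rest.takeWhile (fun y => y == x)).isEmpty && !(PySem.Set.contains absent x) then x else 0)
      + sumRunsB absent (rest.dropWhile (fun y => y == x))
termination_by s => s.length
decreasing_by
  simpa using Nat.lt_succ_of_le (List.length_dropWhile_le _ _)

def sum_of_unique_elements_alt (lst1 : List Int) (lst2 : List Int) : Int :=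
  let s := PySem.List.sorted lst1 (fun x => x) false
  let absent := PySem.Set.ofList lst2
  sumRunsB absent s

-- ===== PRECONDITION & SPEC =====
def Spec_sum_of_unique_elements (lst1 : List Int) (lst2 : List Int) (out : Int) : Prop := out = sum_of_unique_elements_alt lst1 lst2
instance (lst1 : List Int) (lst2 : List Int) (out : Int) : Decidable (Spec_sum_of_unique_elements lst1 lst2 out) := by unfold Spec_sum_of_unique_elements; infer_instance

-- ===== CLAIM (what is proved, stated in full; the proofs are below) =====
def Claim_equal_sum_of_unique_elements : Prop := ∀ (lst1 : List Int) (lst2 : List Int), Dom_sum_of_unique_elements lst1 lst2 → Spec_sum_of_unique_elements lst1 lst2 (sum_of_unique_elements lst1 lst2)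

-- ===== LEMMAS AND PROOFS =====

-- A's counting loop builds exactly Counter(lst1)
theorem fold_eq_counter (lst1 : List Int) :
    lst1.foldl (fun d num =>
      if d.contains num then d.insert num (d.getD num 0 + 1) else d.insert num 1)
      (PySem.Dict.empty : PySem.Dict Int Int) = PySem.Dict.counter lst1 := by
  have h : (fun (d : PySem.Dict Int Int) (num : Int) =>
      if d.contains num then d.insert num (d.getD num 0 + 1) else d.insert num 1)
      = fun d num => d.insert num (d.getD num 0 + 1) := by
    funext d num
    by_cases hc : d.contains num
    · simp [hc]
    · rw [if_neg (by simp [hc]),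
        PySem.Dict.getD_of_not_contains d 0 (by simpa using hc)]
      norm_num
  rw [h, PySem.Dict.foldl_insert_getD_add_one_eq_counter]

-- A's copy/remove loop over a duplicate-free list is a filter
theorem removeLoop (lst2 : List Int) : ∀ (tp acc : List Int), acc.Nodup →
    tp.foldl (fun acc num =>
      if lst2.contains num then
        match PySem.List.remove? acc num with
        | some l => l
        | none => acc
      else acc) acc
    = acc.filter (fun v => !(tp.contains v && lst2.contains v))
  | [], acc, h => by simp
  | x :: tp, acc, h => by
    rw [List.foldl_cons]
    by_cases hc : lst2.contains x
    · have hstep : (if lst2.contains x then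
          match PySem.List.remove? acc x with
          | some l => l
          | none => acc
        else acc) = acc.erase x := by
        rw [if_pos hc]
        by_cases hm : x ∈ acc
        · rw [PySem.List.remove?_eq_some_erase acc x hm]
        · rw [(PySem.List.remove?_eq_none_iff acc x).mpr hm, List.erase_of_not_mem hm]
      rw [hstep, removeLoop lst2 tp _ (h.erase x), List.Nodup.erase_eq_filter h,
        List.filter_filter]
      refine List.filter_congr ?_
      intro v hv
      by_cases hvx : v = x
      · subst hvx; simp at hc; simp [hc]
      · simp [hvx]
    · rw [if_neg hc, removeLoop lst2 tp acc h]
      refine List.filter_congr ?_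
      intro v hv
      by_cases hvx : v = x
      · subst hvx; simp at hc; simp [hc]
      · simp [hvx]

-- A's value: the sum of the first occurrences of the values occurring exactly
-- once in lst1 and not occurring in lst2
theorem lemA (lst1 lst2 : List Int) :
    sum_of_unique_elements lst1 lst2
      = ((PySem.Set.ofList lst1).filter
          (fun v => ((lst1.count v : Int) == 1) && !(lst2.contains v))).sum := by
  simp only [sum_of_unique_elements]
  rw [fold_eq_counter, PySem.Dict.keys_counter]
  simp only [PySem.Dict.getD_counter]
  set L := (PySem.Set.ofList lst1).filter (fun k => ((List.count k lst1 : Int) == 1)) with hL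
  have hnd : L.Nodup := (PySem.Set.nodup_ofList lst1).filter _
  rw [removeLoop lst2 L L hnd, List.filter_filter]
  have hrw : ((PySem.Set.ofList lst1).filter (fun v => (!(L.contains v && lst2.contains v)) && ((List.count v lst1 : Int) == 1)))
      = (PySem.Set.ofList lst1).filter (fun v => ((List.count v lst1 : Int) == 1) && !(lst2.contains v)) := by
    refine List.filter_congr ?_
    intro v hv
    have hv1 : v ∈ lst1 := (PySem.Set.mem_ofList lst1 v).mp hv
    by_cases hc1 : (List.count v lst1 : Int) == 1
    · have hvL : v ∈ L := by rw [hL]; exact List.mem_filter.mpr ⟨hv, hc1⟩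
      by_cases hc2 : lst2.contains v
      · simp [hc1, hvL]
      · have hc2' : lst2.contains v = false := by simpa using hc2
        simp [hc1, hvL]
    · have hc1' : ((List.count v lst1 : Int) == 1) = false := by simpa using hc1
      simp [hc1']
  rw [hrw]
  have : ∀ (l : List Int), l.foldl (fun s num => s + num) 0 = l.sum := by
    intro l
    simpa using PySem.List.foldl_add l (fun x => x) 0
  rw [this]

-- B's run scan over a sorted list computes the same filtered sum
theorem lemB (ab : List Int) : ∀ (n : Nat) (s : List Int), s.length ≤ n → s.Pairwise (· ≤ ·) →
    sumRunsB ab s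
      = ((PySem.Set.ofList s).filter
          (fun v => ((s.count v : Int) == 1) && !(PySem.Set.contains ab v))).sum := by
  intro n
  induction n with
  | zero =>
    intro s hlen _
    have : s = [] := List.eq_nil_of_length_eq_zero (Nat.le_zero.mp hlen)
    subst this
    simp [sumRunsB]
  | succ n ih =>
    intro s hlen hs
    match s with
    | [] => simp [sumRunsB]
    | x :: rest =>
      rw [sumRunsB]
      set run := rest.takeWhile (fun y => y == x) with hrundef
      set rest' := rest.dropWhile (fun y => y == x) with hrest'def
      have hsplit : run ++ rest' = rest := List.takeWhile_append_dropWhile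
      have hpw := (List.pairwise_cons.mp hs)
      have hxle : ∀ y ∈ rest, x ≤ y := hpw.1
      have hrestpw : rest.Pairwise (· ≤ ·) := hpw.2
      have hrest'sub : rest'.Sublist rest := List.dropWhile_sublist _
      have hrest'pw : rest'.Pairwise (· ≤ ·) := hrestpw.sublist hrest'sub
      have hrunx : ∀ y ∈ run, y = x := by
        intro y hy
        simpa using List.mem_takeWhile_imp hy
      have hne : ∀ y ∈ rest', y ≠ x := by
        match hr : rest' with
        | [] => simp
        | y :: t =>
          have hyx : (fun y => y == x) y = false := by
            have := List.head?_dropWhile_not (fun y => y == x) rest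
            rw [← hrest'def] at this
            simpa using this
          have hyx' : y ≠ x := by simpa using hyx
          have hymem : y ∈ rest := hrest'sub.mem List.mem_cons_self
          have hxy : x < y := lt_of_le_of_ne (hxle y hymem) (Ne.symm hyx')
          intro z hz
          rcases List.mem_cons.mp hz with rfl | hzt
          · exact hyx'
          · have hyz : y ≤ z := List.rel_of_pairwise_cons hrest'pw hzt
            have hxz : x < z := lt_of_lt_of_le hxy hyz
            intro h; rw [h] at hxz; exact lt_irrefl x hxz
      have hxnm : x ∉ rest' := fun h => (hne x h) rfl
      have hcx : (x :: rest).count x = 1 + run.length := by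
        rw [List.count_cons_self, ← hsplit, List.count_append,
          List.count_eq_length.mpr (fun b hb => (hrunx b hb).symm),
          List.count_eq_zero.mpr hxnm]
        omega
      have hcv : ∀ v, v ≠ x → (x :: rest).count v = rest'.count v := by
        intro v hv
        rw [List.count_cons, if_neg (by simpa using Ne.symm hv), ← hsplit, List.count_append,
          List.count_eq_zero.mpr (fun h => hv (hrunx v h))]
        omega
      have hlen' : rest'.length ≤ n := by
        have h1 : rest'.length ≤ rest.length := List.length_dropWhile_le _ _
        simp at hlen; omega
      rw [ih rest' hlen' hrest'pw]
      have hnd1 : ((PySem.Set.ofList (x :: rest)).filter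
          (fun v => (((x :: rest).count v : Int) == 1) && !(PySem.Set.contains ab v))).Nodup :=
        (PySem.Set.nodup_ofList _).filter _
      have hnd2 : ((PySem.Set.ofList rest').filter
          (fun v => ((rest'.count v : Int) == 1) && !(PySem.Set.contains ab v))).Nodup :=
        (PySem.Set.nodup_ofList _).filter _
      have hxnm2 : x ∉ (PySem.Set.ofList rest').filter
          (fun v => ((rest'.count v : Int) == 1) && !(PySem.Set.contains ab v)) := by
        intro h
        exact hxnm ((PySem.Set.mem_ofList _ _).mp (List.mem_filter.mp h).1)
      by_cases hcond : (run.isEmpty && !(PySem.Set.contains ab x)) = true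
      · have hrunnil : run = [] := List.isEmpty_iff.mp (Bool.and_elim_left hcond)
        have habx : PySem.Set.contains ab x = false := by
          have := Bool.and_elim_right hcond; simpa using this
        rw [if_pos hcond]
        have hperm : ((PySem.Set.ofList (x :: rest)).filter
            (fun v => (((x :: rest).count v : Int) == 1) && !(PySem.Set.contains ab v))).Perm
            (x :: (PySem.Set.ofList rest').filter
              (fun v => ((rest'.count v : Int) == 1) && !(PySem.Set.contains ab v))) := by
          rw [List.perm_ext_iff_of_nodup hnd1 (List.nodup_cons.mpr ⟨hxnm2, hnd2⟩)]
          intro a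
          simp only [List.mem_filter, PySem.Set.mem_ofList, List.mem_cons, Bool.and_eq_true,
            beq_iff_eq, Bool.not_eq_eq_eq_not, Bool.not_true]
          constructor
          · rintro ⟨ham, hc1, hc2⟩
            by_cases hax : a = x
            · exact Or.inl hax
            · refine Or.inr ⟨?_, ?_, hc2⟩
              · rcases ham with h | h
                · exact absurd h hax
                · rw [← hsplit] at h
                  rcases List.mem_append.mp h with h | h
                  · exact absurd (hrunx a h) hax
                  · exact h
              · rw [hcv a hax] at hc1; exact hc1
          · rintro (rfl | ⟨ham, hc1, hc2⟩)
            · refine ⟨Or.inl rfl, ?_, habx⟩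
              rw [hcx, hrunnil]; simp
            · have hax : a ≠ x := hne a ham
              refine ⟨Or.inr (by rw [← hsplit]; exact List.mem_append.mpr (Or.inr ham)), ?_, hc2⟩
              rw [hcv a hax]; exact hc1
        rw [hperm.sum_eq, List.sum_cons]
      · have hcond' : (run.isEmpty && !(PySem.Set.contains ab x)) = false := by
          simpa using hcond
        rw [if_neg hcond]
        have hxnot : x ∉ (PySem.Set.ofList (x :: rest)).filter
            (fun v => (((x :: rest).count v : Int) == 1) && !(PySem.Set.contains ab v)) := by
          intro h
          have hp := (List.mem_filter.mp h).2
          rcases Bool.and_eq_true_iff.mp hp with ⟨h1, h2⟩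
          rcases Bool.and_eq_false_iff.mp hcond' with hrun | hab
          · have : run ≠ [] := fun he => by rw [he] at hrun; simp at hrun
            have hlenpos : 0 < run.length := List.length_pos_iff.mpr this
            have : (x :: rest).count x = 1 + run.length := hcx
            rw [this] at h1
            have : (1 + run.length : Int) = 1 := by exact_mod_cast (beq_iff_eq.mp h1)
            omega
          · have habx : PySem.Set.contains ab x = true := by simpa using hab
            rw [habx] at h2; simp at h2
        have hperm : ((PySem.Set.ofList (x :: rest)).filter
            (fun v => (((x :: rest).count v : Int) == 1) && !(PySem.Set.contains ab v))).Perm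
            ((PySem.Set.ofList rest').filter
              (fun v => ((rest'.count v : Int) == 1) && !(PySem.Set.contains ab v))) := by
          rw [List.perm_ext_iff_of_nodup hnd1 hnd2]
          intro a
          simp only [List.mem_filter, PySem.Set.mem_ofList, List.mem_cons, Bool.and_eq_true,
            beq_iff_eq]
          constructor
          · rintro ⟨ham, hc1, hc2⟩
            by_cases hax : a = x
            · subst hax
              exfalso
              apply hxnot
              refine List.mem_filter.mpr ⟨(PySem.Set.mem_ofList _ _).mpr (List.mem_cons.mpr (Or.inl rfl)), ?_⟩
              rw [Bool.and_eq_true_iff]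
              exact ⟨beq_iff_eq.mpr hc1, hc2⟩
            · refine ⟨?_, ?_, hc2⟩
              · rcases ham with h | h
                · exact absurd h hax
                · rw [← hsplit] at h
                  rcases List.mem_append.mp h with h | h
                  · exact absurd (hrunx a h) hax
                  · exact h
              · rw [hcv a hax] at hc1; exact hc1
          · rintro ⟨ham, hc1, hc2⟩
            have hax : a ≠ x := hne a ham
            refine ⟨Or.inr (by rw [← hsplit]; exact List.mem_append.mpr (Or.inr ham)), ?_, hc2⟩
            rw [hcv a hax]; exact hc1
        rw [hperm.sum_eq, zero_add]

-- ===== VERDICT (by name: the statement is the Claim_ definition above) =====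
theorem sum_of_unique_elements_spec : Claim_equal_sum_of_unique_elements := by
  intro lst1 lst2 _
  unfold Spec_sum_of_unique_elements
  rw [lemA]
  simp only [sum_of_unique_elements_alt]
  have hpw : (PySem.List.sorted lst1 (fun x => x) false).Pairwise (· ≤ ·) := by
    simpa using PySem.List.sorted_pairwise lst1 (fun x => x)
  rw [lemB (PySem.Set.ofList lst2) (PySem.List.sorted lst1 (fun x => x) false).length
    (PySem.List.sorted lst1 (fun x => x) false) le_rfl hpw]
  have hcount : ∀ a : Int, (PySem.List.sorted lst1 (fun x => x) false).count a = lst1.count a :=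
    fun a => (PySem.List.sorted_perm lst1 (fun x => x) false).count_eq a
  have hcontains : ∀ a : Int, PySem.Set.contains (PySem.Set.ofList lst2) a = lst2.contains a := by
    intro a
    by_cases h : a ∈ lst2
    · simp [PySem.Set.mem_ofList, h]
    · simp [h, PySem.Set.mem_ofList]
  have hperm : ((PySem.Set.ofList lst1).filter
      (fun v => ((lst1.count v : Int) == 1) && !(lst2.contains v))).Perm
      ((PySem.Set.ofList (PySem.List.sorted lst1 (fun x => x) false)).filter
        (fun v => (((PySem.List.sorted lst1 (fun x => x) false).count v : Int) == 1)
          && !(PySem.Set.contains (PySem.Set.ofList lst2) v))) := by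
    rw [List.perm_ext_iff_of_nodup ((PySem.Set.nodup_ofList _).filter _)
      ((PySem.Set.nodup_ofList _).filter _)]
    intro a
    simp only [List.mem_filter, PySem.Set.mem_ofList, PySem.List.mem_sorted, hcount, hcontains]
  exact hperm.sum_eq
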